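-- pv_equiv track=rewrite | github.com/mouradap/bioFellow | functions.py | DNAtomRNA
-- ===== SOURCE A (Python) =====
-- def DNAtomRNA(cds):
-- 	mRNA = ""
-- 	validChars = ['A', 'T', 'C', 'G']
-- 	for char in cds.strip().upper():
--
-- 		if char not in validChars:
-- 			return "Invalid Codon"
-- 		else:
--
-- 			if char == "T":
-- 				char = "U"
-- 			mRNA += char
--
-- 	return mRNA
-- ===== SOURCE B (Python) =====
-- def DNAtomRNA(cds):
--     s = cds.strip().upper()
--     if set(s) <= {'A', 'T', 'C', 'G'}:
--         return s.translate(str.maketrans('T', 'U'))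
--     return "Invalid Codon"
-- ===== Notes on version B (the rewrite author's own statement) =====
-- stated objective: simpler
-- what changed: Replaces A's fused validate-and-build character loop (with early return and string concatenation) by two separate whole-string passes: a set-inclusion validity check, then a translate pass for T->U.
import Mathlib
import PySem

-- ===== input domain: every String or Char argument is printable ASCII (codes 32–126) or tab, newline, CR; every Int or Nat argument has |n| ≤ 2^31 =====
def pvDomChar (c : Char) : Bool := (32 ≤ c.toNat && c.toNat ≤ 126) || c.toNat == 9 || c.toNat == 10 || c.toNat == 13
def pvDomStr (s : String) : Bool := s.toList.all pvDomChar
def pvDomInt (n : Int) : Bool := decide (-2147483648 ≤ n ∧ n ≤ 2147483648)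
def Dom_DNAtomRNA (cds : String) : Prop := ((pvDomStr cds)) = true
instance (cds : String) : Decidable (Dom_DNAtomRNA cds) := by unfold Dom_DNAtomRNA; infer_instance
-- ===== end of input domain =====

-- B splits A's fused validate-and-build loop into two whole-string passes (set-inclusion check, then translate); objective: simpler.

-- ===== PORT A =====
-- A's single loop: early-return "Invalid Codon" on the first invalid char, else append (T→U).
def pvALoop (cs : List Char) (acc : List Char) : String :=
  match cs with
  | [] => String.ofList acc
  | c :: rest =>
    if (['A', 'T', 'C', 'G'].contains c) = false then "Invalid Codon"
    else pvALoop rest (acc ++ [if c = 'T' then 'U' else c])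

def DNAtomRNA (cds : String) : String :=
  pvALoop (PySem.Chars.upper (PySem.Chars.strip cds.toList)) []

-- ===== PORT B =====
-- B: pass 1 — set(s) <= {'A','T','C','G'}; pass 2 — translate T→U over the whole string.
def DNAtomRNA_alt (cds : String) : String :=
  let s := PySem.Chars.upper (PySem.Chars.strip cds.toList)
  if (PySem.Set.ofList s).all (fun c => ['A', 'T', 'C', 'G'].contains c) then
    String.ofList (s.map (fun c => if c = 'T' then 'U' else c))
  else "Invalid Codon"

-- ===== PRECONDITION & SPEC =====
def Spec_DNAtomRNA (cds : String) (out : String) : Prop := out = DNAtomRNA_alt cds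
instance (cds : String) (out : String) : Decidable (Spec_DNAtomRNA cds out) := by unfold Spec_DNAtomRNA; infer_instance

-- ===== CLAIM (what is proved, stated in full; the proofs are below) =====
def Claim_equal_DNAtomRNA : Prop := ∀ (cds : String), Dom_DNAtomRNA cds → Spec_DNAtomRNA cds (DNAtomRNA cds)

-- ===== LEMMAS AND PROOFS =====
-- Characterisation of A's loop: it validates the whole rest and appends the translated chars.
theorem pvALoop_eq (cs : List Char) (acc : List Char) :
    pvALoop cs acc =
      if cs.all (fun c => ['A', 'T', 'C', 'G'].contains c) then
        String.ofList (acc ++ cs.map (fun c => if c = 'T' then 'U' else c))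
      else "Invalid Codon" := by
  induction cs generalizing acc with
  | nil => simp [pvALoop]
  | cons c rest ih =>
    by_cases hc : c ∈ (['A', 'T', 'C', 'G'] : List Char)
    · have h2 : c = 'A' ∨ c = 'T' ∨ c = 'C' ∨ c = 'G' := by simpa using hc
      simp [pvALoop, h2, ih]
    · have h2 : ¬c = 'A' ∧ ¬c = 'T' ∧ ¬c = 'C' ∧ ¬c = 'G' := by simpa using hc
      simp [pvALoop, h2]

theorem all_ofList_eq {α : Type} [DecidableEq α] (xs : List α) (p : α → Bool) :
    (PySem.Set.ofList xs).all p = xs.all p := by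
  rw [Bool.eq_iff_iff]
  simp only [List.all_eq_true]
  constructor
  · intro h x hx; exact h x ((PySem.Set.mem_ofList xs x).mpr hx)
  · intro h x hx; exact h x ((PySem.Set.mem_ofList xs x).mp hx)

-- ===== VERDICT (by name: the statement is the Claim_ definition above) =====
theorem DNAtomRNA_spec : Claim_equal_DNAtomRNA := by
  intro cds _
  unfold Spec_DNAtomRNA DNAtomRNA DNAtomRNA_alt
  rw [pvALoop_eq]
  simp [all_ofList_eq]
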